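-- pv_equiv track=rewrite | github.com/SeanWainstein1/SupportRecovery | support.py | approximate_support_recovery
-- ===== SOURCE A (Python) =====
-- def A_to_B(A):
--     B = [set() for _ in range(len(A[0]))]
--     for row in range(len(A)):
--         for col in range(len(A[row])):
--             if A[row][col]:
--                 B[col].add(row)
--     return B
--
-- def approximate_support_recovery(y,A,k):
--     B = A_to_B(A)
--     C = []
--     y_support = {i for i, val in enumerate(y) if val}
--
--     for i in range(len(A[0])):
--         if(len(B[i] & y_support)>=len(B[i])/2):
--             C.append(i)
--
--     #Remove excess indices (false positives) arbitrarily, here remove from beginning of list in order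
--     return C[max(len(C)-k,0):]
-- ===== SOURCE B (Python) =====
-- def approximate_support_recovery(y, A, k):
--     width = len(A[0])
--     totals = [0] * width
--     matched = [0] * width
--     y_support = {i for i, val in enumerate(y) if val}
--     for ri, row in enumerate(A):
--         in_y = ri in y_support
--         for ci, val in enumerate(row):
--             if val:
--                 totals[ci] += 1
--                 if in_y:
--                     matched[ci] += 1
--     C = [i for i in range(width) if 2 * matched[i] >= totals[i]]
--     return C[max(len(C) - k, 0):]
-- ===== Notes on version B (the rewrite author's own statement) =====
-- stated objective: simpler
-- what changed: B drops A's per-column row-sets (A_to_B) and the set intersection, instead making one row-major pass that accumulates per-column count arrays (total nonzeros and those in y's support) and then selects columns with 2*matched >= total.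
import Mathlib
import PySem

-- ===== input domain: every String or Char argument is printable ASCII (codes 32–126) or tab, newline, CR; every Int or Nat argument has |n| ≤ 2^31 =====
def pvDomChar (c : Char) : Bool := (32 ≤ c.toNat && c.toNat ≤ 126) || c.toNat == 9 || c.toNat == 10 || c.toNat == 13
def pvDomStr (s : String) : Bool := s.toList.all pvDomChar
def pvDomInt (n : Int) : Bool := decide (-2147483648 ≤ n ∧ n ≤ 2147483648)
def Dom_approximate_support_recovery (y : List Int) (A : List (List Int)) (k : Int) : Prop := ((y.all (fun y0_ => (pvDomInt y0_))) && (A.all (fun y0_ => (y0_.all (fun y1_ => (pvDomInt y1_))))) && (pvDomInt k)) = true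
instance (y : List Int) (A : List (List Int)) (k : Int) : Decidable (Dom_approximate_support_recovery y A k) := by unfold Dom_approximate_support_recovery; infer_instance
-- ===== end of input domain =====

-- B replaces A's build-a-set-per-column-then-intersect structure (A_to_B + set intersection)
-- by a single row-major pass accumulating per-column count arrays; objective: simpler.

-- ===== PORT A =====
-- inner column loop of A_to_B for one row (row index v); Python's B[col] indexing raises
-- IndexError when col ≥ len(B) and A[row][col] is truthy — those inputs are excluded by Pre_,
-- on which List.set/getD are exact.

def pvStep (v : Nat) (r : List Int) (B : List (PySem.Set Int)) (col : Nat) : List (PySem.Set Int) :=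
  if r.getD col 0 != 0 then B.set col ((B.getD col PySem.Set.empty).add (Int.ofNat v)) else B

def pvInner (rowIdx : Nat) (r : List Int) (B : List (PySem.Set Int)) : List (PySem.Set Int) :=
  (List.range r.length).foldl (pvStep rowIdx r) B

-- A_to_B: B = [set() for _ in range(len(A[0]))] then nested add of row indices

def pvAtoB (A : List (List Int)) : List (PySem.Set Int) :=
  (List.range A.length).foldl
    (fun B row => pvInner row (A.getD row []) B)
    (List.replicate (A.headD []).length PySem.Set.empty)

def approximate_support_recovery (y : List Int) (A : List (List Int)) (k : Int) : List Int :=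
  let B := pvAtoB A
  let ysupport : PySem.Set Int :=
    PySem.Set.ofList (((PySem.List.enumerate y).filter (fun p => p.2 != 0)).map (fun p => p.1))
  let C : List Int :=
    (List.range (A.headD []).length).foldl
      (fun C i =>
        -- 'len(B[i] & y_support) >= len(B[i]) / 2': both lengths are Python ints, so the
        -- comparison m >= t/2 (exact float halving of an int ≤ 2^31) is exactly 2*m >= t
        if 2 * PySem.Set.len (PySem.Set.inter (B.getD i PySem.Set.empty) ysupport) ≥
            PySem.Set.len (B.getD i PySem.Set.empty)
        then C ++ [Int.ofNat i] else C)
      []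
  PySem.List.slice C (some (max ((C.length : Int) - k) 0)) none

-- ===== PORT B =====
-- one step of B's inner 'for ci, val in enumerate(row)' loop; 'totals[ci] += 1' is Python list
-- indexing, which raises IndexError when ci ≥ width and val is truthy — excluded by Pre_,
-- on which List.set/getD are exact.
def pvAltStep (inY : Bool) (st : List Int × List Int) (p : Int × Int) : List Int × List Int :=
  if p.2 != 0 then
    (st.1.set p.1.toNat (st.1.getD p.1.toNat 0 + 1),
     if inY then st.2.set p.1.toNat (st.2.getD p.1.toNat 0 + 1) else st.2)
  else st

def approximate_support_recovery_alt (y : List Int) (A : List (List Int)) (k : Int) : List Int :=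
  let width := (A.headD []).length
  let ysupport : PySem.Set Int :=
    PySem.Set.ofList (((PySem.List.enumerate y).filter (fun p => p.2 != 0)).map (fun p => p.1))
  let tm :=
    (PySem.List.enumerate A).foldl
      (fun st q => (PySem.List.enumerate q.2).foldl (pvAltStep (ysupport.contains q.1)) st)
      (List.replicate width 0, List.replicate width 0)
  let C : List Int :=
    ((List.range width).filter (fun i => decide (2 * tm.2.getD i 0 ≥ tm.1.getD i 0))).map Int.ofNat
  PySem.List.slice C (some (max ((C.length : Int) - k) 0)) none

-- ===== PRECONDITION & SPEC =====
-- Pre_ excludes exactly the inputs on which A raises IndexError (and B raises there too): A == []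
-- (A[0]), and a nonzero entry at a column index ≥ len(A[0]) (out-of-range list index).
def Pre_approximate_support_recovery (y : List Int) (A : List (List Int)) (k : Int) : Prop :=
  A ≠ [] ∧ ∀ r ∈ A, ∀ x ∈ r.drop (A.headD []).length, x = 0
instance (y : List Int) (A : List (List Int)) (k : Int) : Decidable (Pre_approximate_support_recovery y A k) := by unfold Pre_approximate_support_recovery; infer_instance

def pvWitness_approximate_support_recovery : List Int × List (List Int) × Int :=
  ([1, 0], [[1, 0], [0, 1]], 1)

def Spec_approximate_support_recovery (y : List Int) (A : List (List Int)) (k : Int) (out : List Int) : Prop := out = approximate_support_recovery_alt y A k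
instance (y : List Int) (A : List (List Int)) (k : Int) (out : List Int) : Decidable (Spec_approximate_support_recovery y A k out) := by unfold Spec_approximate_support_recovery; infer_instance

-- ===== CLAIM (what is proved, stated in full; the proofs are below) =====
def Claim_equal_approximate_support_recovery : Prop := ∀ (y : List Int) (A : List (List Int)) (k : Int), Dom_approximate_support_recovery y A k → Pre_approximate_support_recovery y A k → Spec_approximate_support_recovery y A k (approximate_support_recovery y A k)

-- ===== LEMMAS AND PROOFS =====

def pvCondA (A : List (List Int)) (i k : Nat) : Bool := (A.getD k []).getD i 0 != 0

def pvQy (y : List Int) (k : Nat) : Bool := decide (k < y.length) && (y.getD k 0 != 0)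

def pvCnt (p : Nat → Bool) (n : Nat) : Nat := ((List.range n).filter p).length

theorem pvStep_length (v r B col) : (pvStep v r B col).length = B.length := by
  unfold pvStep; split <;> simp

theorem pvFoldRange_length (v : Nat) (r : List Int) (m : Nat) (B : List (PySem.Set Int)) :
    ((List.range m).foldl (pvStep v r) B).length = B.length := by
  induction m generalizing B with
  | zero => rfl
  | succ n ih => rw [List.range_succ, List.foldl_append]; simp [pvStep_length, ih]

theorem pvFoldRange_getD (v : Nat) (r : List Int) (B : List (PySem.Set Int))
    (hz : ∀ j, B.length ≤ j → r.getD j 0 = 0) (m : Nat) (i : Nat) :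
    ((List.range m).foldl (pvStep v r) B).getD i PySem.Set.empty =
      if i < m ∧ r.getD i 0 ≠ 0 then (B.getD i PySem.Set.empty).add (Int.ofNat v)
      else B.getD i PySem.Set.empty := by
  induction m with
  | zero => simp
  | succ n ih =>
    rw [List.range_succ, List.foldl_append]
    simp only [List.foldl_cons, List.foldl_nil]
    set Bn := List.foldl (pvStep v r) B (List.range n) with hBn
    have hlen : Bn.length = B.length := pvFoldRange_length v r n B
    simp only [pvStep]
    by_cases hc : r.getD n 0 = 0
    · simp only [hc, bne_self_eq_false, Bool.false_eq_true, if_false, ih]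
      by_cases hci : r.getD i 0 = 0
      · exact (if_neg (fun h => h.2 hci)).trans (if_neg (fun h => h.2 hci)).symm
      · have hne : i ≠ n := by intro h; exact hci (h ▸ hc)
        refine if_congr ?_ rfl rfl
        constructor
        · rintro ⟨h, h2⟩; exact ⟨by omega, h2⟩
        · rintro ⟨h, h2⟩; exact ⟨by omega, h2⟩
    · have hn : n < B.length := by by_contra hge; exact hc (hz n (by omega))
      simp only [bne_iff_ne, ne_eq, hc, not_false_iff, if_pos]
      have hset : ∀ (w : PySem.Set Int) (j : Nat),
          ((Bn.set n w).getD j PySem.Set.empty) = if j = n then w else Bn.getD j PySem.Set.empty := by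
        intro w j
        by_cases hj : j = n
        · subst hj; simp [List.getD, List.getElem?_set, hlen ▸ hn]
        · rw [List.getD_eq_getElem?_getD, List.getD_eq_getElem?_getD, List.getElem?_set,
              if_neg (Ne.symm hj)]
          exact (if_neg hj).symm
      rw [hset]
      by_cases hj : i = n
      · subst hj
        rw [if_pos rfl, ih, if_neg (fun h => Nat.lt_irrefl i h.1),
            if_pos ⟨Nat.lt_succ_self i, hc⟩]
      · rw [if_neg hj, ih]
        refine if_congr ?_ rfl rfl
        constructor
        · rintro ⟨h, h2⟩; exact ⟨by omega, h2⟩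
        · rintro ⟨h, h2⟩; exact ⟨by omega, h2⟩

theorem pvInner_getD (v : Nat) (r : List Int) (B : List (PySem.Set Int))
    (hz : ∀ j, B.length ≤ j → r.getD j 0 = 0) (i : Nat) :
    (pvInner v r B).getD i PySem.Set.empty =
      if r.getD i 0 ≠ 0 then (B.getD i PySem.Set.empty).add (Int.ofNat v)
      else B.getD i PySem.Set.empty := by
  rw [pvInner, pvFoldRange_getD v r B hz r.length i]
  refine if_congr ?_ rfl rfl
  constructor
  · exact fun h => h.2
  · intro h
    refine ⟨?_, h⟩
    by_contra hge
    exact h (List.getD_eq_default _ _ (by omega))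

theorem pvAtoB_aux (A : List (List Int))
    (hP : ∀ r ∈ A, ∀ j, (A.headD []).length ≤ j → r.getD j 0 = 0) (m : Nat) (hm : m ≤ A.length) (i : Nat) :
    ((List.range m).foldl (fun B row => pvInner row (A.getD row []) B)
        (List.replicate (A.headD []).length PySem.Set.empty)).length = (A.headD []).length ∧
    ((List.range m).foldl (fun B row => pvInner row (A.getD row []) B)
        (List.replicate (A.headD []).length PySem.Set.empty)).getD i PySem.Set.empty =
      ((List.range m).filter (pvCondA A i)).map Int.ofNat := by
  induction m with
  | zero =>
    refine ⟨by simp, ?_⟩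
    simp [List.getD_eq_getElem?_getD, List.getElem?_replicate, PySem.Set.empty]
    split <;> rfl
  | succ n ih =>
    obtain ⟨ihlen, ihD⟩ := ih (by omega)
    rw [List.range_succ, List.foldl_append]
    simp only [List.foldl_cons, List.foldl_nil]
    set Bn := (List.range n).foldl (fun B row => pvInner row (A.getD row []) B)
        (List.replicate (A.headD []).length PySem.Set.empty) with hBn
    have hrow : A.getD n [] ∈ A := by
      have hn : n < A.length := by omega
      rw [List.getD_eq_getElem _ _ hn]; exact List.getElem_mem hn
    have hz : ∀ j, Bn.length ≤ j → (A.getD n []).getD j 0 = 0 := by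
      intro j hj; exact hP _ hrow j (ihlen ▸ hj)
    constructor
    · rw [pvInner, pvFoldRange_length]; exact ihlen
    · rw [pvInner_getD n _ Bn hz i, ihD]
      by_cases hc : (A.getD n []).getD i 0 = 0
      · rw [if_neg (fun h => h hc), List.filter_append]
        have hcb : pvCondA A i n = false := by
          simp only [pvCondA, bne_eq_false_iff_eq]; exact hc
        simp [hcb]
      · rw [if_pos hc, List.filter_append]
        have hcb : pvCondA A i n = true := by
          simp only [pvCondA, bne_iff_ne, ne_eq]; exact hc
        rw [List.filter_cons, hcb]
        simp only [List.filter_nil, List.map_append, List.map_cons, List.map_nil]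
        rw [PySem.Set.add]
        have hmem : PySem.Set.contains (((List.range n).filter (pvCondA A i)).map Int.ofNat)
            (Int.ofNat n) = false := by
          simp only [PySem.Set.contains, List.contains_eq_mem, decide_eq_false_iff_not,
            List.mem_map, List.mem_filter, List.mem_range]
          rintro ⟨a, ⟨ha, _⟩, hae⟩
          have := Int.ofNat.inj hae
          omega
        simp [hmem]

theorem pvAtoB_getD (A : List (List Int))
    (hP : ∀ r ∈ A, ∀ j, (A.headD []).length ≤ j → r.getD j 0 = 0) (i : Nat) :
    (pvAtoB A).getD i PySem.Set.empty =
      ((List.range A.length).filter (pvCondA A i)).map Int.ofNat :=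
  (pvAtoB_aux A hP A.length le_rfl i).2

theorem pv_ysup_mem (y : List Int) (k : Nat) :
    (Int.ofNat k ∈
      PySem.Set.ofList (((PySem.List.enumerate y).filter (fun p => p.2 != 0)).map (fun p => p.1)))
      ↔ pvQy y k = true := by
  rw [PySem.Set.mem_ofList]
  constructor
  · intro h
    simp only [List.mem_map, List.mem_filter, PySem.List.mem_enumerate_iff] at h
    obtain ⟨p, ⟨⟨j, hj, hp⟩, hne⟩, hfst⟩ := h
    subst hp
    simp only [bne_iff_ne, ne_eq] at hne
    simp only at hfst
    have hjk : j = k := by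
      simp only [Int.ofNat_eq_natCast] at hfst
      omega
    subst hjk
    simp only [pvQy, Bool.and_eq_true, decide_eq_true_eq, bne_iff_ne, ne_eq]
    exact ⟨hj, by rw [List.getD_eq_getElem _ _ hj]; exact hne⟩
  · intro h
    simp only [pvQy, Bool.and_eq_true, decide_eq_true_eq, bne_iff_ne, ne_eq] at h
    obtain ⟨hk, hne⟩ := h
    simp only [List.mem_map, List.mem_filter, PySem.List.mem_enumerate_iff]
    refine ⟨(0 + (k : Int), y[k]'hk), ⟨⟨k, hk, rfl⟩, ?_⟩, by simp⟩
    simp only [bne_iff_ne, ne_eq]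
    rw [List.getD_eq_getElem _ _ hk] at hne
    exact hne

theorem pv_ysup_contains (y : List Int) (a : Nat) :
    (PySem.Set.ofList (((PySem.List.enumerate y).filter (fun p => p.2 != 0)).map (fun p => p.1))).contains
      (Int.ofNat a) = pvQy y a := by
  by_cases h : pvQy y a = true
  · rw [h]; exact (PySem.Set.contains_iff _ _).mpr ((pv_ysup_mem y a).mpr h)
  · have hcf : ¬ ((PySem.Set.ofList (((PySem.List.enumerate y).filter (fun p => p.2 != 0)).map (fun p => p.1))).contains (Int.ofNat a) = true) :=
      fun hcm => h ((pv_ysup_mem y a).mp ((PySem.Set.contains_iff _ _).mp hcm))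
    simp only [Bool.not_eq_true] at hcf h
    rw [hcf, h]

theorem pvRange_cast (n : Nat) : PySem.List.pyRange 0 (n : Int) 1 = (List.range n).map Int.ofNat := by
  induction n with
  | zero => rfl
  | succ m ih =>
    have h1 : ((m + 1 : Nat) : Int) = (m : Int) + 1 := by push_cast; ring
    rw [h1, PySem.List.pyRange_one_append 0 (m : Int) ((m : Int) + 1) (by omega) (by omega), ih,
        PySem.List.pyRange_one_cons (by omega : (m : Int) < (m : Int) + 1)]
    have h2 : PySem.List.pyRange ((m : Int) + 1) ((m : Int) + 1) 1 = [] := by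
      simp [PySem.List.pyRange]
    rw [h2, List.range_succ]
    simp

theorem pvA_counts (y : List Int) (A : List (List Int))
    (hP : ∀ r ∈ A, ∀ j, (A.headD []).length ≤ j → r.getD j 0 = 0) (i : Nat) :
    PySem.Set.len ((pvAtoB A).getD i PySem.Set.empty) = (pvCnt (pvCondA A i) A.length : Int) ∧
    PySem.Set.len (PySem.Set.inter ((pvAtoB A).getD i PySem.Set.empty)
        (PySem.Set.ofList (((PySem.List.enumerate y).filter (fun p => p.2 != 0)).map (fun p => p.1))))
      = (pvCnt (fun k => pvCondA A i k && pvQy y k) A.length : Int) := by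
  rw [pvAtoB_getD A hP i]
  constructor
  · simp [PySem.Set.len, pvCnt]
  · rw [PySem.Set.inter, List.filter_map, PySem.Set.len]
    norm_cast
    rw [List.length_map, List.filter_filter, pvCnt]
    congr 1
    apply List.filter_congr
    intro a _
    simp only [Function.comp_apply]
    rw [pv_ysup_contains, Bool.and_comm]

-- ===== B-side lemmas: the per-column count arrays hold exactly the pvCnt counts =====

theorem pv_set_getD (l : List Int) (n : Nat) (v : Int) (hn : n < l.length) (i : Nat) :
    (l.set n v).getD i 0 = if i = n then v else l.getD i 0 := by
  by_cases hj : i = n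
  · subst hj; simp [List.getD, List.getElem?_set, hn]
  · rw [List.getD_eq_getElem?_getD, List.getD_eq_getElem?_getD, List.getElem?_set,
        if_neg (Ne.symm hj)]
    exact (if_neg hj).symm

theorem pvAltInner_aux (b : Bool) (r t m : List Int)
    (hz : ∀ j, t.length ≤ j → r.getD j 0 = 0) (hlen : m.length = t.length) (n : Nat) :
    (((List.range n).foldl
        (fun st j => if r.getD j 0 != 0 then
            (st.1.set j (st.1.getD j 0 + 1), if b then st.2.set j (st.2.getD j 0 + 1) else st.2)
          else st)
        (t, m)).1.length = t.length) ∧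
    (((List.range n).foldl
        (fun st j => if r.getD j 0 != 0 then
            (st.1.set j (st.1.getD j 0 + 1), if b then st.2.set j (st.2.getD j 0 + 1) else st.2)
          else st)
        (t, m)).2.length = m.length) ∧
    ∀ i,
      ((List.range n).foldl
        (fun st j => if r.getD j 0 != 0 then
            (st.1.set j (st.1.getD j 0 + 1), if b then st.2.set j (st.2.getD j 0 + 1) else st.2)
          else st)
        (t, m)).1.getD i 0 = t.getD i 0 + (if i < n ∧ r.getD i 0 ≠ 0 then 1 else 0) ∧
      ((List.range n).foldl
        (fun st j => if r.getD j 0 != 0 then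
            (st.1.set j (st.1.getD j 0 + 1), if b then st.2.set j (st.2.getD j 0 + 1) else st.2)
          else st)
        (t, m)).2.getD i 0 = m.getD i 0 + (if i < n ∧ r.getD i 0 ≠ 0 ∧ b = true then 1 else 0) := by
  induction n with
  | zero => exact ⟨rfl, rfl, fun i => by simp⟩
  | succ n ih =>
    obtain ⟨iht, ihm, ihD⟩ := ih
    rw [List.range_succ, List.foldl_append]
    simp only [List.foldl_cons, List.foldl_nil]
    set Sn := (List.range n).foldl
        (fun st j => if r.getD j 0 != 0 then
            (st.1.set j (st.1.getD j 0 + 1), if b then st.2.set j (st.2.getD j 0 + 1) else st.2)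
          else st)
        (t, m) with hSn
    by_cases hc : r.getD n 0 = 0
    · simp only [hc, bne_self_eq_false, Bool.false_eq_true, if_false]
      refine ⟨iht, ihm, fun i => ?_⟩
      obtain ⟨h1, h2⟩ := ihD i
      refine ⟨h1.trans ?_, h2.trans ?_⟩
      · congr 1
        by_cases hci : r.getD i 0 = 0
        · exact (if_neg (fun h => h.2 hci)).trans (if_neg (fun h => h.2 hci)).symm
        · have hne : i ≠ n := by intro h; exact hci (h ▸ hc)
          exact if_congr ⟨fun h => ⟨by omega, h.2⟩, fun h => ⟨by omega, h.2⟩⟩ rfl rfl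
      · congr 1
        by_cases hci : r.getD i 0 = 0
        · exact (if_neg (fun h => h.2.1 hci)).trans (if_neg (fun h => h.2.1 hci)).symm
        · have hne : i ≠ n := by intro h; exact hci (h ▸ hc)
          exact if_congr ⟨fun h => ⟨by omega, h.2⟩, fun h => ⟨by omega, h.2⟩⟩ rfl rfl
    · have hn : n < t.length := by by_contra hge; exact hc (hz n (by omega))
      simp only [bne_iff_ne, ne_eq, hc, not_false_iff, if_pos]
      refine ⟨by simp [iht], ?_, ?_⟩
      · by_cases hb : b = true
        · simp only [hb, if_pos]; simp [ihm]
        · simp only [Bool.not_eq_true] at hb; simp [hb, ihm]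
      · intro i
        obtain ⟨h1, h2⟩ := ihD i
        constructor
        · rw [pv_set_getD _ n _ (by omega : n < Sn.1.length) i]
          by_cases hj : i = n
          · subst hj
            rw [if_pos rfl, h1, if_neg (fun h => Nat.lt_irrefl i h.1),
                if_pos ⟨Nat.lt_succ_self i, hc⟩]
            ring
          · rw [if_neg hj, h1]
            congr 1
            exact if_congr ⟨fun h => ⟨by omega, h.2⟩, fun h => ⟨by omega, h.2⟩⟩ rfl rfl
        · by_cases hb : b = true
          · subst hb
            rw [if_pos rfl]
            rw [pv_set_getD _ n _ (by omega : n < Sn.2.length) i]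
            by_cases hj : i = n
            · subst hj
              rw [if_pos rfl, h2, if_neg (fun h => Nat.lt_irrefl i h.1),
                  if_pos ⟨Nat.lt_succ_self i, hc, rfl⟩]
              ring
            · rw [if_neg hj, h2]
              congr 1
              exact if_congr ⟨fun h => ⟨by omega, h.2⟩, fun h => ⟨by omega, h.2⟩⟩ rfl rfl
          · simp only [Bool.not_eq_true] at hb
            subst hb
            rw [if_neg (by simp : ¬ (false = true))]
            rw [h2]
            simp

-- the inner 'for ci, val in enumerate(row)' fold rewritten as a fold over List.range
theorem pvAltInner_enum (b : Bool) (r : List Int) (st : List Int × List Int) :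
    (PySem.List.enumerate r).foldl (pvAltStep b) st =
      (List.range r.length).foldl
        (fun st j => if r.getD j 0 != 0 then
            (st.1.set j (st.1.getD j 0 + 1), if b then st.2.set j (st.2.getD j 0 + 1) else st.2)
          else st)
        st := by
  rw [PySem.List.enumerate_eq_map_pyRange r 0, List.foldl_map]
  have hlen : PySem.List.len r = (r.length : Int) := by simp [PySem.List.len]
  rw [hlen, pvRange_cast, List.foldl_map]
  apply PySem.List.foldl_congr_mem
  intro acc x hx
  have hg : PySem.List.pyGetD r ((x : Nat) : Int) 0 = r.getD x 0 :=
    PySem.List.pyGetD_natCast r x 0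
  simp only [pvAltStep, hg, Int.ofNat_eq_natCast, Int.toNat_natCast]

theorem pvCnt_succ (p : Nat → Bool) (n : Nat) :
    pvCnt p (n + 1) = pvCnt p n + (if p n then 1 else 0) := by
  unfold pvCnt
  rw [List.range_succ, List.filter_append, List.length_append, List.filter_cons]
  by_cases h : p n = true <;> simp [h]

theorem pvAltOuter (y : List Int) (A : List (List Int))
    (hP : ∀ r ∈ A, ∀ j, (A.headD []).length ≤ j → r.getD j 0 = 0) (m : Nat) (hm : m ≤ A.length) :
    (((List.range m).foldl
        (fun st row => (PySem.List.enumerate (A.getD row [])).foldl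
            (pvAltStep (pvQy y row)) st)
        (List.replicate (A.headD []).length 0, List.replicate (A.headD []).length 0)).1.length
      = (A.headD []).length) ∧
    (((List.range m).foldl
        (fun st row => (PySem.List.enumerate (A.getD row [])).foldl
            (pvAltStep (pvQy y row)) st)
        (List.replicate (A.headD []).length 0, List.replicate (A.headD []).length 0)).2.length
      = (A.headD []).length) ∧
    ∀ i,
      ((List.range m).foldl
        (fun st row => (PySem.List.enumerate (A.getD row [])).foldl
            (pvAltStep (pvQy y row)) st)
        (List.replicate (A.headD []).length 0, List.replicate (A.headD []).length 0)).1.getD i 0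
        = (pvCnt (pvCondA A i) m : Int) ∧
      ((List.range m).foldl
        (fun st row => (PySem.List.enumerate (A.getD row [])).foldl
            (pvAltStep (pvQy y row)) st)
        (List.replicate (A.headD []).length 0, List.replicate (A.headD []).length 0)).2.getD i 0
        = (pvCnt (fun kk => pvCondA A i kk && pvQy y kk) m : Int) := by
  induction m with
  | zero =>
    refine ⟨by simp, by simp, fun i => ⟨?_, ?_⟩⟩ <;>
    · simp only [List.range_zero, List.foldl_nil, pvCnt, List.filter_nil, List.length_nil,
        Nat.cast_zero, List.getD_eq_getElem?_getD, List.getElem?_replicate]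
      split <;> rfl
  | succ n ih =>
    obtain ⟨iht, ihm, ihD⟩ := ih (by omega)
    rw [List.range_succ, List.foldl_append]
    simp only [List.foldl_cons, List.foldl_nil]
    set Sn := (List.range n).foldl
        (fun st row => (PySem.List.enumerate (A.getD row [])).foldl
            (pvAltStep (pvQy y row)) st)
        (List.replicate (A.headD []).length 0, List.replicate (A.headD []).length 0) with hSn
    have hrow : A.getD n [] ∈ A := by
      have hn : n < A.length := by omega
      rw [List.getD_eq_getElem _ _ hn]; exact List.getElem_mem hn
    have hz : ∀ j, Sn.1.length ≤ j → (A.getD n []).getD j 0 = 0 := by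
      intro j hj; exact hP _ hrow j (iht ▸ hj)
    have hl : Sn.2.length = Sn.1.length := by rw [iht, ihm]
    obtain ⟨ht', hm', hD'⟩ :=
      pvAltInner_aux (pvQy y n) (A.getD n []) Sn.1 Sn.2 hz hl (A.getD n []).length
    rw [pvAltInner_enum]
    refine ⟨by rw [ht', iht], by rw [hm', ihm], fun i => ?_⟩
    obtain ⟨h1, h2⟩ := hD' i
    obtain ⟨g1, g2⟩ := ihD i
    have hciff : (i < (A.getD n []).length ∧ (A.getD n []).getD i 0 ≠ 0) ↔ pvCondA A i n = true := by
      simp only [pvCondA, bne_iff_ne, ne_eq]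
      constructor
      · exact fun h => h.2
      · intro h
        exact ⟨by by_contra hge; exact h (List.getD_eq_default _ _ (by omega)), h⟩
    constructor
    · rw [h1, g1, pvCnt_succ]
      by_cases hc : pvCondA A i n = true
      · rw [if_pos (hciff.mpr hc), if_pos hc]; push_cast; ring
      · rw [if_neg (fun hh => hc (hciff.mp hh)), if_neg hc]; push_cast; ring
    · rw [h2, g2, pvCnt_succ]
      by_cases hc : (pvCondA A i n && pvQy y n) = true
      · obtain ⟨hc1, hc2⟩ := Bool.and_eq_true_iff.mp hc
        rw [if_pos ⟨(hciff.mpr hc1).1, (hciff.mpr hc1).2, hc2⟩, if_pos hc]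
        push_cast; ring
      · rw [if_neg, if_neg hc]
        · push_cast; ring
        · rintro ⟨ha, hb, hq⟩
          exact hc (Bool.and_eq_true_iff.mpr ⟨hciff.mp ⟨ha, hb⟩, hq⟩)

-- the outer 'for ri, row in enumerate(A)' fold rewritten as a fold over List.range
theorem pvAltOuter_enum (y : List Int) (A : List (List Int)) (st : List Int × List Int) :
    (PySem.List.enumerate A).foldl
        (fun st q => (PySem.List.enumerate q.2).foldl
          (pvAltStep ((PySem.Set.ofList (((PySem.List.enumerate y).filter (fun p => p.2 != 0)).map (fun p => p.1))).contains q.1)) st)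
        st =
      (List.range A.length).foldl
        (fun st row => (PySem.List.enumerate (A.getD row [])).foldl
            (pvAltStep (pvQy y row)) st)
        st := by
  rw [PySem.List.enumerate_eq_map_pyRange A [], List.foldl_map]
  have hlen : PySem.List.len A = (A.length : Int) := by simp [PySem.List.len]
  rw [hlen, pvRange_cast, List.foldl_map]
  apply PySem.List.foldl_congr_mem
  intro acc x hx
  have hg : PySem.List.pyGetD A ((x : Nat) : Int) [] = A.getD x [] :=
    PySem.List.pyGetD_natCast A x []
  have hy := pv_ysup_contains y x
  simp only [Int.ofNat_eq_natCast] at hy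
  simp only [Int.ofNat_eq_natCast, hg, hy]

theorem pv_main (y : List Int) (A : List (List Int)) (k : Int)
    (hpre : A ≠ [] ∧ ∀ r ∈ A, ∀ x ∈ r.drop (A.headD []).length, x = 0) :
    approximate_support_recovery y A k = approximate_support_recovery_alt y A k := by
  obtain ⟨hne, hall⟩ := hpre
  have hP : ∀ r ∈ A, ∀ j, (A.headD []).length ≤ j → r.getD j 0 = 0 := by
    intro r hr j hj
    by_cases hjl : j < r.length
    · rw [List.getD_eq_getElem _ _ hjl]
      refine hall r hr _ ?_
      have : r[j] = (r.drop (A.headD []).length)[j - (A.headD []).length]'(by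
        rw [List.length_drop]; omega) := by
        rw [List.getElem_drop]
        congr 1
        omega
      rw [this]
      exact List.getElem_mem _
    · exact List.getD_eq_default _ _ (by omega)
  unfold approximate_support_recovery approximate_support_recovery_alt
  simp only
  rw [pvAltOuter_enum]
  obtain ⟨_, _, hD⟩ := pvAltOuter y A hP A.length le_rfl
  have hCA : (List.range (A.headD []).length).foldl
      (fun C i =>
        if 2 * PySem.Set.len (PySem.Set.inter ((pvAtoB A).getD i PySem.Set.empty)
            (PySem.Set.ofList (((PySem.List.enumerate y).filter (fun p => p.2 != 0)).map (fun p => p.1)))) ≥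
            PySem.Set.len ((pvAtoB A).getD i PySem.Set.empty)
        then C ++ [Int.ofNat i] else C) [] =
      ((List.range (A.headD []).length).filter
        (fun i => decide ((2 * (pvCnt (fun kk => pvCondA A i kk && pvQy y kk) A.length : Int) ≥
            (pvCnt (pvCondA A i) A.length : Int))))).map Int.ofNat := by
    rw [PySem.List.foldl_append_ite
      (p := fun i => 2 * PySem.Set.len (PySem.Set.inter ((pvAtoB A).getD i PySem.Set.empty)
            (PySem.Set.ofList (((PySem.List.enumerate y).filter (fun p => p.2 != 0)).map (fun p => p.1)))) ≥
            PySem.Set.len ((pvAtoB A).getD i PySem.Set.empty))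
      (f := fun i => Int.ofNat i)]
    rw [List.nil_append]
    congr 1
    apply List.filter_congr
    intro a _
    obtain ⟨hlenEq, hinterEq⟩ := pvA_counts y A hP a
    rw [hinterEq, hlenEq]
  rw [hCA]
  have hCB : ∀ i ∈ List.range (A.headD []).length,
      (decide (2 * ((List.range A.length).foldl
          (fun st row => (PySem.List.enumerate (A.getD row [])).foldl (pvAltStep (pvQy y row)) st)
          (List.replicate (A.headD []).length 0, List.replicate (A.headD []).length 0)).2.getD i 0 ≥
        ((List.range A.length).foldl
          (fun st row => (PySem.List.enumerate (A.getD row [])).foldl (pvAltStep (pvQy y row)) st)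
          (List.replicate (A.headD []).length 0, List.replicate (A.headD []).length 0)).1.getD i 0))
      = decide ((2 * (pvCnt (fun kk => pvCondA A i kk && pvQy y kk) A.length : Int) ≥
            (pvCnt (pvCondA A i) A.length : Int))) := by
    intro i _
    obtain ⟨h1, h2⟩ := hD i
    rw [h1, h2]
  rw [List.filter_congr hCB]

-- ===== VERDICT (by name: the statement is the Claim_ definition above) =====
theorem approximate_support_recovery_spec : Claim_equal_approximate_support_recovery := by
  intro y A k _ hpre
  unfold Spec_approximate_support_recovery
  exact pv_main y A k hpre
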